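-- pv_equiv track=rewrite | github.com/bambang-salim/sql | sqli_project_wml.py | _use_alternate_syntax
-- ===== SOURCE A (Python) =====
-- def _use_alternate_syntax(payload: str) -> str:
--     """Use alternative SQL syntax"""
--     replacements = {
--         "OR": "||",
--         "AND": "&&",
--         "SELECT": "SELECTION",
--         "UNION": "UNIONN",
--     }
--
--     for original, replacement in replacements.items():
--         payload = payload.replace(original, replacement)
--     return payload
-- ===== SOURCE B (Python) =====
-- def _use_alternate_syntax(payload: str) -> str:
--     """Use alternative SQL syntax (single left-to-right scan instead of four replace passes)."""
--     out = []
--     i = 0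
--     n = len(payload)
--     while i < n:
--         if payload.startswith("OR", i):
--             out.append("||")
--             i += 2
--         elif payload.startswith("AND", i):
--             out.append("&&")
--             i += 3
--         elif payload.startswith("SELECT", i):
--             out.append("SELECTION")
--             i += 6
--         elif payload.startswith("UNION", i):
--             out.append("UNIONN")
--             i += 5
--         else:
--             out.append(payload[i])
--             i += 1
--     return "".join(out)
-- ===== Notes on version B (the rewrite author's own statement) =====
-- stated objective: alternative
-- what changed: Replaces the four sequential full-string str.replace passes with one left-to-right scan that matches all four keywords at each position and emits the replacement or the character, building the output once.
import Mathlib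
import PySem

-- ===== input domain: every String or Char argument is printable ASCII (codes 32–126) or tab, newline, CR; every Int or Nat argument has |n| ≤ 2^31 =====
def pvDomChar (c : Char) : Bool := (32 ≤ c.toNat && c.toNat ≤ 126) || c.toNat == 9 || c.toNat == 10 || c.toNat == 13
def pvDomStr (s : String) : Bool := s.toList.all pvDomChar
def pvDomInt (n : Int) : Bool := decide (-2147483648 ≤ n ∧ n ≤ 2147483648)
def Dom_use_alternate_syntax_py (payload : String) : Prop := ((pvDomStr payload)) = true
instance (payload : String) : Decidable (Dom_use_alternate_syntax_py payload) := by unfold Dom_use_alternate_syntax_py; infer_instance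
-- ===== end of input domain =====

-- B replaces A's four sequential str.replace passes by one left-to-right scan that
-- matches all four keywords at each position (objective: alternative).

-- ===== PORT A =====
-- the dict literal, then the loop 'for original, replacement in replacements.items(): payload = payload.replace(original, replacement)'
def use_alternate_syntax_py (payload : String) : String :=
  let replacements : PySem.Dict String String :=
    PySem.Dict.ofList [("OR", "||"), ("AND", "&&"), ("SELECT", "SELECTION"), ("UNION", "UNIONN")]
  replacements.items.foldl (fun p pr => PySem.Str.replace p pr.1 pr.2) payload

-- ===== PORT B =====
-- Source B's while loop: at index i try "OR"/"AND"/"SELECT"/"UNION", emit the replacement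
-- (or the single character) and advance; here as a scan over the char list.
def altScan : List Char → List Char
  | 'O' :: 'R' :: t => '|' :: '|' :: altScan t
  | 'A' :: 'N' :: 'D' :: t => '&' :: '&' :: altScan t
  | 'S' :: 'E' :: 'L' :: 'E' :: 'C' :: 'T' :: t =>
      'S' :: 'E' :: 'L' :: 'E' :: 'C' :: 'T' :: 'I' :: 'O' :: 'N' :: altScan t
  | 'U' :: 'N' :: 'I' :: 'O' :: 'N' :: t =>
      'U' :: 'N' :: 'I' :: 'O' :: 'N' :: 'N' :: altScan t
  | c :: t => c :: altScan t
  | [] => []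

def use_alternate_syntax_py_alt (payload : String) : String :=
  String.ofList (altScan payload.toList)

-- ===== PRECONDITION & SPEC =====
def Spec_use_alternate_syntax_py (payload : String) (out : String) : Prop := out = use_alternate_syntax_py_alt payload
instance (payload : String) (out : String) : Decidable (Spec_use_alternate_syntax_py payload out) := by unfold Spec_use_alternate_syntax_py; infer_instance

-- ===== CLAIM (what is proved, stated in full; the proofs are below) =====
def Claim_equal_use_alternate_syntax_py : Prop := ∀ (payload : String), Dom_use_alternate_syntax_py payload → Spec_use_alternate_syntax_py payload (use_alternate_syntax_py payload)

-- ===== LEMMAS AND PROOFS =====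

-- step lemmas for PySem.Chars.replace (old ≠ [])
lemma replace_unfold (old new l : List Char) (hold : old ≠ []) :
    PySem.Chars.replace l old new = PySem.Chars.replace.go old new l.length l [] := by
  rw [PySem.Chars.replace]
  simp [List.isEmpty_eq_false_iff (l := old) |>.mpr hold]

lemma replace_go_eq (old new : List Char) (hold : old ≠ []) :
    ∀ (fuel : Nat) (l acc : List Char), l.length ≤ fuel →
      PySem.Chars.replace.go old new fuel l acc = acc.reverse ++ PySem.Chars.replace l old new := by
  intro fuel
  induction fuel using Nat.strong_induction_on with
  | _ fuel ih =>
    intro l acc hl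
    match fuel, l with
    | 0, l =>
      have hl' : l = [] := List.eq_nil_of_length_eq_zero (Nat.le_zero.mp hl)
      subst hl'
      rw [PySem.Chars.replace.go.eq_def, replace_unfold _ _ _ hold]
      rw [PySem.Chars.replace.go.eq_def]
      simp
    | fuel + 1, [] =>
      rw [PySem.Chars.replace.go.eq_def, replace_unfold _ _ _ hold]
      rw [PySem.Chars.replace.go.eq_def]
      simp
    | fuel + 1, c :: t =>
      have holdlen : 1 ≤ old.length := List.length_pos_iff.mpr hold
      have hl2 : t.length ≤ fuel := by simp at hl; omega
      rw [PySem.Chars.replace.go.eq_def]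
      conv_rhs => rw [replace_unfold _ _ _ hold]
      rw [show (c :: t).length = t.length + 1 from rfl]
      rw [PySem.Chars.replace.go.eq_def]
      by_cases hpre : old.isPrefixOf (c :: t) = true
      · simp only [hpre, if_true]
        rw [ih fuel (by omega) _ _ (by simp; omega)]
        rw [ih t.length (by omega) _ _ (by simp; omega)]
        simp
      · simp only [hpre]
        rw [ih fuel (by omega) _ _ hl2]
        rw [ih t.length (by omega) _ _ le_rfl]
        simp

lemma replace_nil (old new : List Char) (hold : old ≠ []) :
    PySem.Chars.replace [] old new = [] := by
  rw [replace_unfold _ _ _ hold, PySem.Chars.replace.go.eq_def]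
  simp

lemma replace_pos (old new l : List Char) (hold : old ≠ []) (h : old.isPrefixOf l = true) :
    PySem.Chars.replace l old new = new ++ PySem.Chars.replace (l.drop old.length) old new := by
  cases l with
  | nil =>
    exfalso
    have : old = [] := List.prefix_nil.mp (List.isPrefixOf_iff_prefix.mp h)
    exact hold this
  | cons c t =>
    have holdlen : 1 ≤ old.length := List.length_pos_iff.mpr hold
    rw [replace_unfold _ _ _ hold]
    rw [show (c :: t).length = t.length + 1 from rfl]
    rw [PySem.Chars.replace.go.eq_def]
    simp only [h, if_true]
    rw [replace_go_eq _ _ hold _ _ _ (by simp; omega)]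
    simp

lemma replace_cons (old new : List Char) (c : Char) (t : List Char) (hold : old ≠ [])
    (h : old.isPrefixOf (c :: t) = false) :
    PySem.Chars.replace (c :: t) old new = c :: PySem.Chars.replace t old new := by
  rw [replace_unfold _ _ _ hold]
  rw [show (c :: t).length = t.length + 1 from rfl]
  rw [PySem.Chars.replace.go.eq_def]
  simp only [h]
  rw [replace_go_eq _ _ hold _ _ _ le_rfl]
  simp

lemma replace_cons_ne (a : Char) (old' new : List Char) (c : Char) (t : List Char) (h : c ≠ a) :
    PySem.Chars.replace (c :: t) (a :: old') new = c :: PySem.Chars.replace t (a :: old') new := by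
  apply replace_cons _ _ _ _ (by simp)
  simp [List.isPrefixOf]
  intro hc
  exact absurd hc.symm h

-- the intermediate scans: what the payload looks like after 1, 2, 3 of A's passes
def scan1 : List Char → List Char
  | 'O' :: 'R' :: t => '|' :: '|' :: scan1 t
  | c :: t => c :: scan1 t
  | [] => []

def scan2 : List Char → List Char
  | 'O' :: 'R' :: t => '|' :: '|' :: scan2 t
  | 'A' :: 'N' :: 'D' :: t => '&' :: '&' :: scan2 t
  | c :: t => c :: scan2 t
  | [] => []

def scan3 : List Char → List Char
  | 'O' :: 'R' :: t => '|' :: '|' :: scan3 t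
  | 'A' :: 'N' :: 'D' :: t => '&' :: '&' :: scan3 t
  | 'S' :: 'E' :: 'L' :: 'E' :: 'C' :: 'T' :: t =>
      'S' :: 'E' :: 'L' :: 'E' :: 'C' :: 'T' :: 'I' :: 'O' :: 'N' :: scan3 t
  | c :: t => c :: scan3 t
  | [] => []

-- conditional default-case equations for the scans
lemma scan1_cons (c : Char) (t : List Char) (h : ∀ u, c = 'O' → t = 'R' :: u → False) :
    scan1 (c :: t) = c :: scan1 t := by
  rw [scan1.eq_def]
  split
  · rename_i u heq
    injection heq with h1 h2
    exact absurd (h u h1 h2) not_false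
  · rename_i c' t' hs heq
    cases heq
    rfl
  · rename_i heq
    cases heq

lemma scan2_cons (c : Char) (t : List Char)
    (h1 : ∀ u, c = 'O' → t = 'R' :: u → False)
    (h2 : ∀ u, c = 'A' → t = 'N' :: 'D' :: u → False) :
    scan2 (c :: t) = c :: scan2 t := by
  rw [scan2.eq_def]
  split
  · rename_i u heq
    injection heq with g1 g2
    exact absurd (h1 u g1 g2) not_false
  · rename_i u heq
    injection heq with g1 g2
    exact absurd (h2 u g1 g2) not_false
  · rename_i c' t' hs1 hs2 heq
    cases heq
    rfl
  · rename_i heq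
    cases heq

lemma scan3_cons (c : Char) (t : List Char)
    (h1 : ∀ u, c = 'O' → t = 'R' :: u → False)
    (h2 : ∀ u, c = 'A' → t = 'N' :: 'D' :: u → False)
    (h3 : ∀ u, c = 'S' → t = 'E' :: 'L' :: 'E' :: 'C' :: 'T' :: u → False) :
    scan3 (c :: t) = c :: scan3 t := by
  rw [scan3.eq_def]
  split
  · rename_i u heq
    injection heq with g1 g2
    exact absurd (h1 u g1 g2) not_false
  · rename_i u heq
    injection heq with g1 g2
    exact absurd (h2 u g1 g2) not_false
  · rename_i u heq
    injection heq with g1 g2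
    exact absurd (h3 u g1 g2) not_false
  · rename_i c' t' hs1 hs2 hs3 heq
    cases heq
    rfl
  · rename_i heq
    cases heq

lemma altScan_cons (c : Char) (t : List Char)
    (h1 : ∀ u, c = 'O' → t = 'R' :: u → False)
    (h2 : ∀ u, c = 'A' → t = 'N' :: 'D' :: u → False)
    (h3 : ∀ u, c = 'S' → t = 'E' :: 'L' :: 'E' :: 'C' :: 'T' :: u → False)
    (h4 : ∀ u, c = 'U' → t = 'N' :: 'I' :: 'O' :: 'N' :: u → False) :
    altScan (c :: t) = c :: altScan t := by
  rw [altScan.eq_def]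
  split
  · rename_i u heq
    injection heq with g1 g2
    exact absurd (h1 u g1 g2) not_false
  · rename_i u heq
    injection heq with g1 g2
    exact absurd (h2 u g1 g2) not_false
  · rename_i u heq
    injection heq with g1 g2
    exact absurd (h3 u g1 g2) not_false
  · rename_i u heq
    injection heq with g1 g2
    exact absurd (h4 u g1 g2) not_false
  · rename_i c' t' hs1 hs2 hs3 hs4 heq
    cases heq
    rfl
  · rename_i heq
    cases heq

-- head characterisations: an output character that is not a replacement head comes from the input
lemma scan1_head (t : List Char) (x : Char) (rest : List Char) (hx : x ≠ '|')
    (h : scan1 t = x :: rest) : ∃ u, t = x :: u ∧ rest = scan1 u := by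
  induction t using scan1.induct with
  | case1 u ih =>
    simp only [scan1] at h
    injection h with h1 h2
    exact absurd h1.symm hx
  | case2 c u hs ih =>
    rw [scan1_cons c u hs] at h
    injection h with h1 h2
    exact ⟨u, by rw [h1], h2.symm⟩
  | case3 =>
    simp [scan1] at h

lemma scan2_head (t : List Char) (x : Char) (rest : List Char) (hx1 : x ≠ '|') (hx2 : x ≠ '&')
    (h : scan2 t = x :: rest) : ∃ u, t = x :: u ∧ rest = scan2 u := by
  induction t using scan2.induct with
  | case1 u ih =>
    simp only [scan2] at h
    injection h with h1 h2
    exact absurd h1.symm hx1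
  | case2 u ih =>
    simp only [scan2] at h
    injection h with h1 h2
    exact absurd h1.symm hx2
  | case3 c u hs1 hs2 ih =>
    rw [scan2_cons c u hs1 hs2] at h
    injection h with h1 h2
    exact ⟨u, by rw [h1], h2.symm⟩
  | case4 =>
    simp [scan2] at h

lemma scan3_head (t : List Char) (x : Char) (rest : List Char) (hx1 : x ≠ '|') (hx2 : x ≠ '&')
    (hx3 : x ≠ 'S') (h : scan3 t = x :: rest) : ∃ u, t = x :: u ∧ rest = scan3 u := by
  induction t using scan3.induct with
  | case1 u ih =>
    simp only [scan3] at h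
    injection h with h1 h2
    exact absurd h1.symm hx1
  | case2 u ih =>
    simp only [scan3] at h
    injection h with h1 h2
    exact absurd h1.symm hx2
  | case3 u ih =>
    simp only [scan3] at h
    injection h with h1 h2
    exact absurd h1.symm hx3
  | case4 c u hs1 hs2 hs3 ih =>
    rw [scan3_cons c u hs1 hs2 hs3] at h
    injection h with h1 h2
    exact ⟨u, by rw [h1], h2.symm⟩
  | case5 =>
    simp [scan3] at h

-- keyword tails cannot appear at the head of an earlier pass's output unless they were in its input
lemma notND_scan1 (t : List Char) (h : ∀ u, t = 'N' :: 'D' :: u → False) :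
    (['N','D'].isPrefixOf (scan1 t)) = false := by
  by_contra hb
  have hb' : (['N','D'].isPrefixOf (scan1 t)) = true := by
    cases hq : ['N','D'].isPrefixOf (scan1 t) with
    | true => rfl
    | false => exact absurd hq hb
  cases hst : scan1 t with
  | nil => rw [hst] at hb'; simp [List.isPrefixOf] at hb'
  | cons x r =>
    rw [hst] at hb'
    simp [List.isPrefixOf] at hb'
    obtain ⟨hx, hr⟩ := hb'
    subst hx
    obtain ⟨u, hu, hru⟩ := scan1_head t 'N' r (by decide) hst
    cases hr2 : r with
    | nil => rw [hr2] at hr; simp at hr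
    | cons y s =>
      rw [hr2] at hr
      simp at hr
      subst hr
      rw [hr2] at hru
      obtain ⟨v, hv, _⟩ := scan1_head u 'D' s (by decide) hru.symm
      exact h v (by rw [hu, hv])

lemma notELECT_scan2 (t : List Char)
    (h : ∀ u, t = 'E' :: 'L' :: 'E' :: 'C' :: 'T' :: u → False) :
    (['E','L','E','C','T'].isPrefixOf (scan2 t)) = false := by
  by_contra hb
  have hb' : (['E','L','E','C','T'].isPrefixOf (scan2 t)) = true := by
    cases hq : ['E','L','E','C','T'].isPrefixOf (scan2 t) with
    | true => rfl
    | false => exact absurd hq hb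
  have hpre : ['E','L','E','C','T'] <+: scan2 t := List.isPrefixOf_iff_prefix.mp hb'
  obtain ⟨r, hr⟩ := hpre
  simp at hr
  obtain ⟨u1, hu1, hr1⟩ := scan2_head t 'E' _ (by decide) (by decide) hr.symm
  obtain ⟨u2, hu2, hr2⟩ := scan2_head u1 'L' _ (by decide) (by decide) hr1.symm
  obtain ⟨u3, hu3, hr3⟩ := scan2_head u2 'E' _ (by decide) (by decide) hr2.symm
  obtain ⟨u4, hu4, hr4⟩ := scan2_head u3 'C' _ (by decide) (by decide) hr3.symm
  obtain ⟨u5, hu5, _⟩ := scan2_head u4 'T' _ (by decide) (by decide) hr4.symm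
  exact h u5 (by rw [hu1, hu2, hu3, hu4, hu5])

lemma notNION_scan3 (t : List Char)
    (h : ∀ u, t = 'N' :: 'I' :: 'O' :: 'N' :: u → False) :
    (['N','I','O','N'].isPrefixOf (scan3 t)) = false := by
  by_contra hb
  have hb' : (['N','I','O','N'].isPrefixOf (scan3 t)) = true := by
    cases hq : ['N','I','O','N'].isPrefixOf (scan3 t) with
    | true => rfl
    | false => exact absurd hq hb
  have hpre : ['N','I','O','N'] <+: scan3 t := List.isPrefixOf_iff_prefix.mp hb'
  obtain ⟨r, hr⟩ := hpre
  simp at hr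
  obtain ⟨u1, hu1, hr1⟩ := scan3_head t 'N' _ (by decide) (by decide) (by decide) hr.symm
  obtain ⟨u2, hu2, hr2⟩ := scan3_head u1 'I' _ (by decide) (by decide) (by decide) hr1.symm
  obtain ⟨u3, hu3, hr3⟩ := scan3_head u2 'O' _ (by decide) (by decide) (by decide) hr2.symm
  obtain ⟨u4, hu4, _⟩ := scan3_head u3 'N' _ (by decide) (by decide) (by decide) hr3.symm
  exact h u4 (by rw [hu1, hu2, hu3, hu4])

-- first chars differ: the keyword is not a prefix
lemma prefix_false_of_head_ne (a : Char) (old' : List Char) (c : Char) (l : List Char)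
    (h : c ≠ a) : ((a :: old').isPrefixOf (c :: l)) = false := by
  simp [List.isPrefixOf]
  intro hc
  exact absurd hc.symm h

-- pass lemmas: each of A's replace passes turns scan(k-1) into scank
lemma pass1 (l : List Char) : PySem.Chars.replace l ['O','R'] ['|','|'] = scan1 l := by
  induction l using scan1.induct with
  | case1 u ih =>
    rw [replace_pos _ _ _ (by simp) (by simp [List.isPrefixOf])]
    simp only [List.length_cons, List.length_nil, List.drop]
    rw [ih]
    simp [scan1]
  | case2 c u hs ih =>
    have hp : (['O','R'].isPrefixOf (c :: u)) = false := by
      by_cases hc : c = 'O'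
      · subst hc
        cases u with
        | nil => simp [List.isPrefixOf]
        | cons d v =>
          simp [List.isPrefixOf]
          intro hd
          exact absurd (hs v rfl (by rw [hd])) not_false
      · exact prefix_false_of_head_ne _ _ _ _ hc
    rw [replace_cons _ _ _ _ (by simp) hp, ih, scan1_cons c u hs]
  | case3 =>
    rw [replace_nil _ _ (by simp)]
    simp [scan1]

lemma pass2 (l : List Char) : PySem.Chars.replace (scan1 l) ['A','N','D'] ['&','&'] = scan2 l := by
  induction l using scan2.induct with
  | case1 u ih =>
    simp only [scan1]
    rw [replace_cons_ne _ _ _ _ _ (by decide), replace_cons_ne _ _ _ _ _ (by decide), ih]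
    simp [scan2]
  | case2 u ih =>
    have h1 : scan1 ('A' :: 'N' :: 'D' :: u) = 'A' :: 'N' :: 'D' :: scan1 u := by
      simp [scan1]
    rw [h1]
    rw [replace_pos _ _ _ (by simp) (by simp [List.isPrefixOf])]
    simp only [List.length_cons, List.length_nil, List.drop]
    rw [ih]
    simp [scan2]
  | case3 c u hs1 hs2 ih =>
    rw [scan1_cons c u hs1]
    have hp : (['A','N','D'].isPrefixOf (c :: scan1 u)) = false := by
      by_cases hc : c = 'A'
      · subst hc
        have hnd := notND_scan1 u (fun v hv => hs2 v rfl hv)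
        simpa [List.isPrefixOf] using hnd
      · exact prefix_false_of_head_ne _ _ _ _ hc
    rw [replace_cons _ _ _ _ (by simp) hp, ih, scan2_cons c u hs1 hs2]
  | case4 =>
    simp only [scan1]
    rw [replace_nil _ _ (by simp)]
    simp [scan2]

lemma pass3 (l : List Char) :
    PySem.Chars.replace (scan2 l) ['S','E','L','E','C','T'] ['S','E','L','E','C','T','I','O','N'] = scan3 l := by
  induction l using scan3.induct with
  | case1 u ih =>
    simp only [scan2]
    rw [replace_cons_ne _ _ _ _ _ (by decide), replace_cons_ne _ _ _ _ _ (by decide), ih]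
    simp [scan3]
  | case2 u ih =>
    simp only [scan2]
    rw [replace_cons_ne _ _ _ _ _ (by decide), replace_cons_ne _ _ _ _ _ (by decide), ih]
    simp [scan3]
  | case3 u ih =>
    have h1 : scan2 ('S' :: 'E' :: 'L' :: 'E' :: 'C' :: 'T' :: u) =
        'S' :: 'E' :: 'L' :: 'E' :: 'C' :: 'T' :: scan2 u := by
      simp [scan2]
    rw [h1]
    rw [replace_pos _ _ _ (by simp) (by simp [List.isPrefixOf])]
    simp only [List.length_cons, List.length_nil, List.drop]
    rw [ih]
    simp [scan3]
  | case4 c u hs1 hs2 hs3 ih =>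
    rw [scan2_cons c u hs1 hs2]
    have hp : (['S','E','L','E','C','T'].isPrefixOf (c :: scan2 u)) = false := by
      by_cases hc : c = 'S'
      · subst hc
        have he := notELECT_scan2 u (fun v hv => hs3 v rfl hv)
        simpa [List.isPrefixOf] using he
      · exact prefix_false_of_head_ne _ _ _ _ hc
    rw [replace_cons _ _ _ _ (by simp) hp, ih, scan3_cons c u hs1 hs2 hs3]
  | case5 =>
    simp only [scan2]
    rw [replace_nil _ _ (by simp)]
    simp [scan3]

lemma pass4 (l : List Char) :
    PySem.Chars.replace (scan3 l) ['U','N','I','O','N'] ['U','N','I','O','N','N'] = altScan l := by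
  induction l using altScan.induct with
  | case1 u ih =>
    simp only [scan3]
    rw [replace_cons_ne _ _ _ _ _ (by decide), replace_cons_ne _ _ _ _ _ (by decide), ih]
    simp [altScan]
  | case2 u ih =>
    simp only [scan3]
    rw [replace_cons_ne _ _ _ _ _ (by decide), replace_cons_ne _ _ _ _ _ (by decide), ih]
    simp [altScan]
  | case3 u ih =>
    have h1 : scan3 ('S' :: 'E' :: 'L' :: 'E' :: 'C' :: 'T' :: u) =
        'S' :: 'E' :: 'L' :: 'E' :: 'C' :: 'T' :: 'I' :: 'O' :: 'N' :: scan3 u := by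
      simp [scan3]
    rw [h1]
    rw [replace_cons_ne _ _ _ _ _ (by decide), replace_cons_ne _ _ _ _ _ (by decide),
        replace_cons_ne _ _ _ _ _ (by decide), replace_cons_ne _ _ _ _ _ (by decide),
        replace_cons_ne _ _ _ _ _ (by decide), replace_cons_ne _ _ _ _ _ (by decide),
        replace_cons_ne _ _ _ _ _ (by decide), replace_cons_ne _ _ _ _ _ (by decide),
        replace_cons_ne _ _ _ _ _ (by decide), ih]
    simp [altScan]
  | case4 u ih =>
    have h1 : scan3 ('U' :: 'N' :: 'I' :: 'O' :: 'N' :: u) =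
        'U' :: 'N' :: 'I' :: 'O' :: 'N' :: scan3 u := by
      simp [scan3]
    rw [h1]
    rw [replace_pos _ _ _ (by simp) (by simp [List.isPrefixOf])]
    simp only [List.length_cons, List.length_nil, List.drop]
    rw [ih]
    simp [altScan]
  | case5 c u hs1 hs2 hs3 hs4 ih =>
    rw [scan3_cons c u hs1 hs2 hs3]
    have hp : (['U','N','I','O','N'].isPrefixOf (c :: scan3 u)) = false := by
      by_cases hc : c = 'U'
      · subst hc
        have hn := notNION_scan3 u (fun v hv => hs4 v rfl hv)
        simpa [List.isPrefixOf] using hn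
      · exact prefix_false_of_head_ne _ _ _ _ hc
    rw [replace_cons _ _ _ _ (by simp) hp, ih, altScan_cons c u hs1 hs2 hs3 hs4]
  | case6 =>
    simp only [scan3]
    rw [replace_nil _ _ (by simp)]
    simp [altScan]

-- ===== VERDICT (by name: the statement is the Claim_ definition above) =====
theorem use_alternate_syntax_py_spec : Claim_equal_use_alternate_syntax_py := by
  intro payload _
  unfold Spec_use_alternate_syntax_py use_alternate_syntax_py use_alternate_syntax_py_alt
  show (PySem.Dict.ofList
      [("OR", "||"), ("AND", "&&"), ("SELECT", "SELECTION"), ("UNION", "UNIONN")]).items.foldl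
      (fun p pr => PySem.Str.replace p pr.1 pr.2) payload = String.ofList (altScan payload.toList)
  have hitems : (PySem.Dict.ofList
      [("OR", "||"), ("AND", "&&"), ("SELECT", "SELECTION"), ("UNION", "UNIONN")]).items
      = [("OR", "||"), ("AND", "&&"), ("SELECT", "SELECTION"), ("UNION", "UNIONN")] := by decide
  rw [hitems]
  simp only [List.foldl]
  apply String.ext
  simp only [PySem.Str.toList_replace, String.toList_ofList]
  rw [show "OR".toList = ['O','R'] from rfl, show "||".toList = ['|','|'] from rfl,
      show "AND".toList = ['A','N','D'] from rfl, show "&&".toList = ['&','&'] from rfl,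
      show "SELECT".toList = ['S','E','L','E','C','T'] from rfl,
      show "SELECTION".toList = ['S','E','L','E','C','T','I','O','N'] from rfl,
      show "UNION".toList = ['U','N','I','O','N'] from rfl,
      show "UNIONN".toList = ['U','N','I','O','N','N'] from rfl]
  rw [pass1, pass2, pass3, pass4]
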